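-- pv_equiv track=rewrite | github.com/danielcy/trade | utils/list_utils.py | minus_list
-- ===== SOURCE A (Python) =====
-- def minus_list(a, b):
--     len_a = len(a)
--     len_b = len(b)
--     result = []
--     if len_a == len_b:
--         for i in range(len_a):
--             result.append(a[i] - b[i])
--         return result
--     temp = []
--     temp = fill(temp, 0, abs(len_a - len_b))
--     if len_a > len_b:
--         temp.extend(b)
--         for i in range(len_a):
--             result.append(a[i] - temp[i])
--     else:
--         temp.extend(a)
--         for i in range(len_b):
--             result.append(temp[i] - b[i])
--     return result
--
-- def fill(target, element, cnt):
--     for i in range(cnt):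
--         target.append(element)
--     return target
-- ===== SOURCE B (Python) =====
-- def minus_list(a, b):
--     # One uniform back-aligned pass: walk both lists from the end (via reversed
--     # copies), treating missing positions as 0, then flip the result.
--     ra = a[::-1]
--     rb = b[::-1]
--     la = len(ra)
--     lb = len(rb)
--     out = []
--     for k in range(max(la, lb)):
--         x = ra[k] if k < la else 0
--         y = rb[k] if k < lb else 0
--         out.append(x - y)
--     out.reverse()
--     return out
-- ===== Notes on version B (the rewrite author's own statement) =====
-- stated objective: simpler
-- what changed: Replaces A's three-way length comparison with explicit zero-prefix padding of the shorter list by a single uniform backward-aligned pass over reversed lists (missing positions read as 0) followed by one reverse.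
import Mathlib
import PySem

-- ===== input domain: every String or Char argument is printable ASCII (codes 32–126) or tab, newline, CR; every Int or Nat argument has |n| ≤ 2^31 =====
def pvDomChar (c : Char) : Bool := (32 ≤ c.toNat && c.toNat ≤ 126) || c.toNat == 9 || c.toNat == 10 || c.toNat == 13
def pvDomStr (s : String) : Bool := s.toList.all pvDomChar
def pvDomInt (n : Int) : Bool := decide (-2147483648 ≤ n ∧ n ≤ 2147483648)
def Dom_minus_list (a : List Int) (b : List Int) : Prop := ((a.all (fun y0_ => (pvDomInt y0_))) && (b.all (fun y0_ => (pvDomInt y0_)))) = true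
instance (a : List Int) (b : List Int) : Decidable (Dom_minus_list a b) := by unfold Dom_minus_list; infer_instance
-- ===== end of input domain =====

-- B replaces A's three-way length comparison + manual zero-prefix padding by one
-- uniform backward-aligned pass over reversed lists (missing positions read as 0), then a reverse.

-- ===== PORT A =====
-- helper 'fill' from the Python module
def pvFill (target : List Int) (element : Int) (cnt : Int) : List Int :=
  (PySem.List.pyRange 0 cnt 1).foldl (fun t _ => t ++ [element]) target

def minus_list (a : List Int) (b : List Int) : List Int :=
  let len_a : Int := a.length
  let len_b : Int := b.length
  if len_a = len_b then
    (PySem.List.pyRange 0 len_a 1).foldl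
      (fun r i => r ++ [PySem.List.pyGetD a i 0 - PySem.List.pyGetD b i 0]) []
  else
    let temp := pvFill [] 0 |len_a - len_b|
    if len_a > len_b then
      let temp2 := temp ++ b
      (PySem.List.pyRange 0 len_a 1).foldl
        (fun r i => r ++ [PySem.List.pyGetD a i 0 - PySem.List.pyGetD temp2 i 0]) []
    else
      let temp2 := temp ++ a
      (PySem.List.pyRange 0 len_b 1).foldl
        (fun r i => r ++ [PySem.List.pyGetD temp2 i 0 - PySem.List.pyGetD b i 0]) []

-- ===== PORT B =====
def minus_list_alt (a : List Int) (b : List Int) : List Int :=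
  let ra := a.reverse
  let rb := b.reverse
  let la : Int := ra.length
  let lb : Int := rb.length
  ((PySem.List.pyRange 0 (max la lb) 1).foldl
    (fun out k =>
      out ++ [(if k < la then PySem.List.pyGetD ra k 0 else 0) -
              (if k < lb then PySem.List.pyGetD rb k 0 else 0)]) []).reverse

-- ===== PRECONDITION & SPEC =====
def Spec_minus_list (a : List Int) (b : List Int) (out : List Int) : Prop := out = minus_list_alt a b
instance (a : List Int) (b : List Int) (out : List Int) : Decidable (Spec_minus_list a b out) := by unfold Spec_minus_list; infer_instance

-- ===== CLAIM (what is proved, stated in full; the proofs are below) =====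
def Claim_equal_minus_list : Prop := ∀ (a : List Int) (b : List Int), Dom_minus_list a b → Spec_minus_list a b (minus_list a b)

-- ===== LEMMAS AND PROOFS =====

-- element k of a list zero-padded on the left to length n
def padGet (xs : List Int) (n k : Nat) : Int :=
  if k < n - xs.length then 0 else xs.getD (k - (n - xs.length)) 0

lemma padGet_append (p : Nat) (b : List Int) (k : Nat) :
    (List.replicate p (0:Int) ++ b).getD k 0 = if k < p then 0 else b.getD (k - p) 0 := by
  by_cases h : k < p
  · rw [List.getD_eq_getElem?_getD, List.getElem?_append_left (by simpa using h)]
    simp [h]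
  · rw [List.getD_eq_getElem?_getD, List.getElem?_append_right (by simpa using not_lt.mp h)]
    simp [h]

lemma pvFill_eq (cnt : Nat) : pvFill [] 0 (cnt:Int) = List.replicate cnt 0 := by
  unfold pvFill
  simp [PySem.List.foldl_append_singleton_eq_map (f := fun _ => (0:Int)), List.map_const',
    PySem.List.length_pyRange_one]

lemma A_form (a b : List Int) : minus_list a b =
    (List.range (max a.length b.length)).map
      (fun k => padGet a (max a.length b.length) k - padGet b (max a.length b.length) k) := by
  unfold minus_list
  rcases Nat.lt_trichotomy a.length b.length with h | h | h
  · -- len_a < len_b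
    rw [if_neg (by exact_mod_cast Nat.ne_of_lt h), if_neg (by omega)]
    have habs : |(a.length:Int) - b.length| = ((b.length - a.length : Nat) : Int) := by
      rw [abs_of_nonpos (by omega)]; omega
    rw [habs, pvFill_eq]
    rw [PySem.List.foldl_append_singleton_eq_map, PySem.List.pyRange_one]
    simp only [List.nil_append, List.map_map, Int.sub_zero, Int.toNat_natCast,
      Nat.max_eq_right (Nat.le_of_lt h)]
    apply List.map_congr_left
    intro k hk
    have hk' : k < b.length := List.mem_range.mp hk
    simp only [Function.comp, zero_add, PySem.List.pyGetD_natCast, padGet, padGet_append]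
    have : b.length - b.length = 0 := by omega
    rw [this]
    simp
  · -- equal lengths
    rw [if_pos (by exact_mod_cast h)]
    rw [PySem.List.foldl_append_singleton_eq_map, PySem.List.pyRange_one]
    simp only [List.nil_append, List.map_map, Int.sub_zero, Int.toNat_natCast, h, Nat.max_self]
    apply List.map_congr_left
    intro k hk
    have hk' : k < b.length := List.mem_range.mp hk
    simp only [Function.comp, zero_add, PySem.List.pyGetD_natCast, padGet, h]
    simp
  · -- len_a > len_b
    rw [if_neg (by exact_mod_cast Nat.ne_of_gt h), if_pos (by exact_mod_cast h)]
    have habs : |(a.length:Int) - b.length| = ((a.length - b.length : Nat) : Int) := by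
      rw [abs_of_nonneg (by omega)]; omega
    rw [habs, pvFill_eq]
    rw [PySem.List.foldl_append_singleton_eq_map, PySem.List.pyRange_one]
    simp only [List.nil_append, List.map_map, Int.sub_zero, Int.toNat_natCast,
      Nat.max_eq_left (Nat.le_of_lt h)]
    apply List.map_congr_left
    intro k hk
    have hk' : k < a.length := List.mem_range.mp hk
    simp only [Function.comp, zero_add, PySem.List.pyGetD_natCast, padGet, padGet_append]
    have : a.length - a.length = 0 := by omega
    rw [this]
    simp

lemma rev_get (xs : List Int) (n k : Nat) (hk : k < n) (hle : xs.length ≤ n) :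
    (if ((n-1-k : Nat):Int) < (xs.length:Int) then xs.reverse.getD (n-1-k) 0 else 0)
      = padGet xs n k := by
  by_cases h : n-1-k < xs.length
  · rw [if_pos (by exact_mod_cast h)]
    unfold padGet
    rw [if_neg (by omega)]
    have h2 : k - (n - xs.length) < xs.length := by omega
    rw [List.getD_eq_getElem _ _ (by simpa using h), List.getD_eq_getElem _ _ h2,
        List.getElem_reverse]
    congr 1
    omega
  · rw [if_neg (by exact_mod_cast h)]
    unfold padGet
    rw [if_pos (by omega)]

lemma B_form (a b : List Int) : minus_list_alt a b =
    (List.range (max a.length b.length)).map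
      (fun k => padGet a (max a.length b.length) k - padGet b (max a.length b.length) k) := by
  unfold minus_list_alt
  simp only [PySem.List.foldl_append_singleton_eq_map, PySem.List.pyRange_one,
    List.nil_append, List.map_map, List.length_reverse, Int.sub_zero, zero_add]
  have hmax : (max ((a.length:Int)) ((b.length:Int))).toNat = max a.length b.length := by omega
  rw [hmax]
  apply List.ext_getElem
  · simp
  · intro k h1 h2
    rw [List.getElem_reverse]
    simp only [List.getElem_map, List.getElem_range, List.length_map, List.length_range,
      Function.comp_apply, PySem.List.pyGetD_natCast]
    have hk : k < max a.length b.length := by simpa using h2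
    rw [rev_get a _ k hk (by omega), rev_get b _ k hk (by omega)]

theorem minus_list_main (a b : List Int) : minus_list a b = minus_list_alt a b := by
  rw [A_form, B_form]

-- ===== VERDICT (by name: the statement is the Claim_ definition above) =====
theorem minus_list_spec : Claim_equal_minus_list := by
  intro a b _
  unfold Spec_minus_list
  exact minus_list_main a b
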